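-- pv_equiv track=rewrite | github.com/yananfei-Bette/Leetcode | amazonOA/oa/k_with_no_duplicates.py | countDist
-- ===== SOURCE A (Python) =====
-- def countDist(str, k):
-- 	if not str or len(str) < k:
-- 		return []
--
-- 	strArray = list(str)
-- 	res = []
-- 	lo = 0
-- 	while lo <= len(strArray) - k:
-- 		charSet = set()
-- 		for i in range(k):
-- 			charSet.add(strArray[lo + i])
-- 		if len(charSet) == k:
-- 			res.append("".join(strArray[lo: lo + k]))
-- 		lo += 1
-- 	return res
-- ===== SOURCE B (Python) =====
-- def countDist(str, k):
--     # Sliding window with a frequency map and an incrementally maintained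
--     # distinct-character count: O(n) instead of A's O(n*k).
--     n = len(str)
--     if k <= 0 or k > n:
--         return []
--     res = []
--     freq = {}
--     distinct = 0
--     for i in range(n):
--         c = str[i]
--         freq[c] = freq.get(c, 0) + 1
--         if freq[c] == 1:
--             distinct += 1
--         if i >= k:
--             d = str[i - k]
--             freq[d] -= 1
--             if freq[d] == 0:
--                 distinct -= 1
--         if i >= k - 1 and distinct == k:
--             res.append(str[i - k + 1 : i + 1])
--     return res
-- ===== Notes on version B (the rewrite author's own statement) =====
-- stated objective: faster
-- what changed: A rebuilds a character set from scratch for every window (O(n*k)); B keeps one sliding window with a frequency map and an incrementally updated distinct-character count, emitting each length-k window in O(1) amortized (O(n)).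
-- intended difference: For k = 0 on a non-empty string A returns len(str)+1 copies of the empty string (an accident of its loop bounds: the empty set trivially has size 0), while B returns [], the intended answer since there are no length-0 substrings worth reporting; on all other inputs A and B agree. — e.g. on countDist("ab", 0): A returns ["", "", ""], B returns []
import Mathlib
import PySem

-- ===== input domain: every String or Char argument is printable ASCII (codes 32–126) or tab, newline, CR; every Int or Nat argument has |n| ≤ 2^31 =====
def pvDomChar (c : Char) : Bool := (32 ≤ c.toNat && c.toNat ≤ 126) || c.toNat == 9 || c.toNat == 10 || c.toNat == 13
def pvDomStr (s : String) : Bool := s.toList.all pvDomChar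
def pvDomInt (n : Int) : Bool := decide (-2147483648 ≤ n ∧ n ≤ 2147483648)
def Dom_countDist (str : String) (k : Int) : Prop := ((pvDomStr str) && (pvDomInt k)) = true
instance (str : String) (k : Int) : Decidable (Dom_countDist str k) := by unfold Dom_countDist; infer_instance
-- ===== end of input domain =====

-- B replaces A's per-window set rebuild (O(n*k)) by a sliding window with a frequency map and an
-- incrementally maintained distinct-character count (objective: faster); return value only.

-- ===== PORT A =====
-- charSet = set(); for i in range(k): charSet.add(strArray[lo + i])
-- (index lo + i is always in range when A executes this, so the getD default ' ' is unreachable)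
def countDistSetFold (strArray : List Char) (k : Int) (lo : Nat) : PySem.Set Char :=
  (PySem.List.pyRange 0 k 1).foldl
    (fun cs i => PySem.Set.add cs (PySem.List.pyGetD strArray ((lo : Int) + i) ' '))
    PySem.Set.empty

-- while lo <= len(strArray) - k: … ; lo += 1   (fuel = exact number of remaining iterations)
def countDistLoop (strArray : List Char) (k : Int) : Nat → Nat → List String → List String
  | 0, _, res => res
  | fuel + 1, lo, res =>
    if (lo : Int) ≤ (strArray.length : Int) - k then
      let charSet := countDistSetFold strArray k lo
      let res' := if (charSet.length : Int) = k
        then res ++ [String.ofList (PySem.List.slice strArray (some (lo : Int)) (some ((lo : Int) + k)))]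
        else res
      countDistLoop strArray k fuel (lo + 1) res'
    else res

def countDist (str : String) (k : Int) : List String :=
  if str.toList = [] ∨ (str.toList.length : Int) < k then []
  else countDistLoop str.toList k (((str.toList.length : Int) - k + 1).toNat) 0 []

-- ===== PORT B =====
-- one iteration of Source B's for-loop body over state (res, freq, distinct), loop index i
def countDistAltStep (s : List Char) (k : Int)
    (st : List String × PySem.Dict Char Int × Int) (i : Int) :
    List String × PySem.Dict Char Int × Int :=
  let res := st.1
  let freq := st.2.1
  let distinct := st.2.2
  let c := PySem.List.pyGetD s i ' '
  let freq1 := freq.insert c (freq.getD c 0 + 1)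
  let distinct1 := if freq1.getD c 0 = 1 then distinct + 1 else distinct
  let st2 :=
    if i ≥ k then
      let d := PySem.List.pyGetD s (i - k) ' '
      let freq2 := freq1.insert d (freq1.getD d 0 - 1)
      let distinct2 := if freq2.getD d 0 = 0 then distinct1 - 1 else distinct1
      (freq2, distinct2)
    else (freq1, distinct1)
  let res' := if i ≥ k - 1 ∧ st2.2 = k
    then res ++ [String.ofList (PySem.List.slice s (some (i - k + 1)) (some (i + 1)))]
    else res
  (res', st2.1, st2.2)

def countDist_alt (str : String) (k : Int) : List String :=
  let s := str.toList
  let n := s.length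
  if k ≤ 0 ∨ (n : Int) < k then []
  else
    ((PySem.List.pyRange 0 (n : Int) 1).foldl (countDistAltStep s k)
      ([], PySem.Dict.empty, 0)).1

-- ===== PRECONDITION & SPEC =====
-- For k = 0 on a non-empty string A returns len(str)+1 copies of "" (an accident of its loop
-- bounds: the empty set trivially has size 0), while B returns [], the intended answer since
-- there are no length-0 substrings worth reporting.
def D_countDist (str : String) (k : Int) : Prop := k = 0 ∧ str.toList ≠ []
instance (str : String) (k : Int) : Decidable (D_countDist str k) := by unfold D_countDist; infer_instance
def Spec_countDist (str : String) (k : Int) (out : List String) : Prop :=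
  ¬ D_countDist str k → out = countDist_alt str k
instance (str : String) (k : Int) (out : List String) : Decidable (Spec_countDist str k out) := by unfold Spec_countDist; infer_instance

def pvDiffWitness_countDist : String × Int := ("ab", 0)
def pvDiffWitnessOut_countDist : (List String) × (List String) := (["", "", ""], [])

-- ===== CLAIM (what is proved, stated in full; the proofs are below) =====
def Claim_unchanged_countDist : Prop := ∀ (str : String) (k : Int), Dom_countDist str k → Spec_countDist str k (countDist str k)
def Claim_changed_countDist : Prop := Dom_countDist (pvDiffWitness_countDist.1) (pvDiffWitness_countDist.2) ∧ D_countDist (pvDiffWitness_countDist.1) (pvDiffWitness_countDist.2) ∧ countDist (pvDiffWitness_countDist.1) (pvDiffWitness_countDist.2) = pvDiffWitnessOut_countDist.1 ∧ countDist_alt (pvDiffWitness_countDist.1) (pvDiffWitness_countDist.2) = pvDiffWitnessOut_countDist.2 ∧ pvDiffWitnessOut_countDist.1 ≠ pvDiffWitnessOut_countDist.2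
def Claim_exact_countDist : Prop := ∀ (str : String) (k : Int), Dom_countDist str k → D_countDist str k → countDist str k ≠ countDist_alt str k

-- ===== LEMMAS AND PROOFS =====

-- the window of length κ starting at lo
def pvWindow (s : List Char) (κ lo : Nat) : List Char := (s.drop lo).take κ

-- the common answer: every start lo whose window has no duplicate, in order
def pvAns (s : List Char) (κ : Nat) : List String :=
  ((List.range (s.length + 1 - κ)).filter (fun lo => decide (pvWindow s κ lo).Nodup)).map
    (fun lo => String.ofList (pvWindow s κ lo))

lemma pv_window_len (s : List Char) (κ lo : Nat) (h : lo + κ ≤ s.length) :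
    (pvWindow s κ lo).length = κ := by
  simp [pvWindow]; omega

lemma pv_map_getD_range (s : List Char) (κ lo : Nat) (h : lo + κ ≤ s.length) :
    (List.range κ).map (fun j => s.getD (lo + j) ' ') = pvWindow s κ lo := by
  apply List.ext_getElem
  · simp [pvWindow]; omega
  · intro i h1 h2
    have hi : i < κ := by simpa using h1
    have hlt : lo + i < s.length := by omega
    simp only [List.getElem_map, List.getElem_range, pvWindow, List.getElem_take,
      List.getElem_drop]
    rw [List.getD_eq_getElem s ' ' hlt]

lemma pv_ofList_length (w : List Char) :
    (PySem.Set.ofList w).length = w.toFinset.card := by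
  have hnd : (PySem.Set.ofList w).Nodup := PySem.Set.nodup_ofList w
  have hfs : (PySem.Set.ofList w).toFinset = w.toFinset := by
    ext x; simp [List.mem_toFinset, PySem.Set.mem_ofList]
  rw [← List.toFinset_card_of_nodup hnd, hfs]

lemma pv_nodup_iff (w : List Char) (κ : Nat) (hw : w.length = κ) :
    w.toFinset.card = κ ↔ w.Nodup := by
  constructor
  · intro h
    rw [List.card_toFinset] at h
    have hsub := List.dedup_sublist w
    have := hsub.eq_of_length (by omega)
    exact List.dedup_eq_self.mp this
  · intro h; rw [List.toFinset_card_of_nodup h, hw]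

lemma pv_charSet_eq (s : List Char) (κ lo : Nat) (h : lo + κ ≤ s.length) :
    countDistSetFold s (κ : Int) lo = PySem.Set.ofList (pvWindow s κ lo) := by
  unfold countDistSetFold
  rw [PySem.List.pyRange_zero_natCast, List.foldl_map]
  have hfn : (fun (cs : PySem.Set Char) (j : Nat) =>
      PySem.Set.add cs (PySem.List.pyGetD s ((lo : Int) + (j : Int)) ' ')) =
      (fun cs j => PySem.Set.add cs (s.getD (lo + j) ' ')) := by
    funext cs j
    rw [show (lo : Int) + (j : Int) = ((lo + j : Nat) : Int) by push_cast; ring,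
      PySem.List.pyGetD_natCast]
  rw [hfn, ← PySem.Set.update_map_eq_foldl_add, show (PySem.Set.empty : PySem.Set Char) = [] from rfl,
    PySem.Set.update_nil_left, pv_map_getD_range s κ lo h]

lemma pv_slice_window (s : List Char) (κ lo : Nat) :
    PySem.List.slice s (some (lo : Int)) (some ((lo : Int) + (κ : Int))) = pvWindow s κ lo := by
  rw [show (lo : Int) + (κ : Int) = ((lo + κ : Nat) : Int) by push_cast; ring,
    PySem.List.slice_natCast]
  simp only [pvWindow]
  congr 1
  omega

-- A's loop, characterized
lemma pv_loopA (s : List Char) (κ : Nat) (_hκ : 1 ≤ κ) (hn : κ ≤ s.length) :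
    ∀ (m fuel lo : Nat) (res : List String), m ≤ fuel → lo + m = s.length + 1 - κ →
      countDistLoop s (κ : Int) fuel lo res =
        res ++ ((List.range' lo m).filter (fun l => decide (pvWindow s κ l).Nodup)).map
          (fun l => String.ofList (pvWindow s κ l)) := by
  intro m
  induction m with
  | zero =>
    intro fuel lo res _ hsum
    have hguard : ¬ ((lo : Int) ≤ (s.length : Int) - (κ : Int)) := by omega
    cases fuel with
    | zero => simp [countDistLoop]
    | succ f => simp [countDistLoop, hguard]
  | succ m ih =>
    intro fuel lo res hf hsum
    cases fuel with
    | zero => omega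
    | succ f =>
      have hguard : (lo : Int) ≤ (s.length : Int) - (κ : Int) := by omega
      have hwin : lo + κ ≤ s.length := by omega
      simp only [countDistLoop, if_pos hguard]
      rw [pv_charSet_eq s κ lo hwin, pv_slice_window s κ lo]
      have hlen : (pvWindow s κ lo).length = κ := pv_window_len s κ lo hwin
      have hcond : (((PySem.Set.ofList (pvWindow s κ lo)).length : Int) = (κ : Int)) ↔
          (pvWindow s κ lo).Nodup := by
        rw [pv_ofList_length, Int.natCast_inj, pv_nodup_iff _ κ hlen]
      rw [ih f (lo + 1) _ (by omega) (by omega)]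
      rw [List.range'_succ]
      by_cases hnd : (pvWindow s κ lo).Nodup
      · rw [if_pos (hcond.mpr hnd), List.filter_cons_of_pos (by simpa using hnd), List.map_cons]
        simp
      · rw [if_neg (fun h => hnd (hcond.mp h)), List.filter_cons_of_neg (by simpa using hnd)]

lemma pv_countDist_eq (s : List Char) (κ : Nat) (hκ : 1 ≤ κ) (hn : κ ≤ s.length) :
    countDistLoop s (κ : Int) (((s.length : Int) - (κ : Int) + 1).toNat) 0 [] = pvAns s κ := by
  rw [pv_loopA s κ hκ hn (s.length + 1 - κ) _ 0 [] (by omega) (by omega)]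
  unfold pvAns
  rw [List.range_eq_range']
  simp

-- B-side: sliding window
def pvWnd (s : List Char) (κ m : Nat) : List Char := (s.take m).drop (m - κ)

lemma pv_wnd_take (s : List Char) (κ m : Nat) (h : m ≤ κ) : pvWnd s κ m = s.take m := by
  unfold pvWnd
  rw [show m - κ = 0 by omega, List.drop_zero]

lemma pv_wnd_drop (s : List Char) (κ m : Nat) (h : κ ≤ m) :
    pvWnd s κ m = (s.drop (m - κ)).take κ := by
  unfold pvWnd
  rw [List.drop_take, show m - (m - κ) = κ by omega]

lemma pv_card_app (w : List Char) (c : Char) :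
    (w ++ [c]).toFinset.card = if c ∈ w then w.toFinset.card else w.toFinset.card + 1 := by
  have hfs : (w ++ [c]).toFinset = insert c w.toFinset := by
    simp [List.toFinset_append, Finset.union_comm w.toFinset]
  rw [hfs]
  by_cases hc : c ∈ w
  · rw [Finset.insert_eq_self.mpr (List.mem_toFinset.mpr hc), if_pos hc]
  · rw [Finset.card_insert_of_notMem (fun h => hc (List.mem_toFinset.mp h)), if_neg hc]

lemma pv_card_cons (d : Char) (w : List Char) :
    (d :: w).toFinset.card = if d ∈ w then w.toFinset.card else w.toFinset.card + 1 := by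
  rw [List.toFinset_cons]
  by_cases hd : d ∈ w
  · rw [Finset.insert_eq_self.mpr (List.mem_toFinset.mpr hd), if_pos hd]
  · rw [Finset.card_insert_of_notMem (fun h => hd (List.mem_toFinset.mp h)), if_neg hd]

-- one iteration of B preserves the invariant
lemma pv_step_char (s : List Char) (κ : Nat) (hκ : 1 ≤ κ) (m : Nat) (hm : m < s.length)
    (res : List String) (freq : PySem.Dict Char Int)
    (hfreq : ∀ c : Char, freq.getD c 0 = ((pvWnd s κ m).count c : Int)) :
    ∃ freq' : PySem.Dict Char Int,
      countDistAltStep s (κ : Int) (res, freq, ((pvWnd s κ m).toFinset.card : Int)) (m : Int) =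
        (res ++ (if κ ≤ m + 1 ∧ (pvWindow s κ (m + 1 - κ)).Nodup
            then [String.ofList (pvWindow s κ (m + 1 - κ))] else []),
          freq', ((pvWnd s κ (m + 1)).toFinset.card : Int)) ∧
      ∀ c : Char, freq'.getD c 0 = ((pvWnd s κ (m + 1)).count c : Int) := by
  set cc := s.getD m ' ' with hcc
  have hc : PySem.List.pyGetD s (m : Int) ' ' = cc := by
    rw [PySem.List.pyGetD_natCast]
  have hf1 : ∀ x : Char,
      (freq.insert cc (freq.getD cc 0 + 1)).getD x 0 =
        (((pvWnd s κ m ++ [cc]).count x : Nat) : Int) := by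
    intro x
    rw [PySem.Dict.getD_insert]
    by_cases hx : x = cc
    · rw [if_pos hx, hx, hfreq cc, List.count_append]
      simp
    · rw [if_neg hx, hfreq x, List.count_append]
      have : (cc == x) = false := by simpa using Ne.symm hx
      simp [List.count_singleton, this]
  have hcond1 : ((freq.insert cc (freq.getD cc 0 + 1)).getD cc 0 = 1) ↔
      cc ∉ pvWnd s κ m := by
    rw [hf1 cc, List.count_append]
    simp only [List.count_singleton, beq_self_eq_true, if_pos]
    constructor
    · intro h
      have : (pvWnd s κ m).count cc = 0 := by omega
      exact List.count_eq_zero.mp this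
    · intro h
      rw [List.count_eq_zero.mpr h]
      simp
  by_cases hκm : κ ≤ m
  · -- remove branch fires: window slides
    set dd := s.getD (m - κ) ' ' with hdd
    have hd : PySem.List.pyGetD s ((m : Int) - (κ : Int)) ' ' = dd := by
      rw [show (m : Int) - (κ : Int) = ((m - κ : Nat) : Int) by omega,
        PySem.List.pyGetD_natCast]
    have hdec : pvWnd s κ m ++ [cc] = dd :: pvWnd s κ (m + 1) := by
      rw [pv_wnd_drop s κ m hκm, pv_wnd_drop s κ (m + 1) (by omega)]
      have h1 : (s.drop (m - κ)).take (κ + 1) = (s.drop (m - κ)).take κ ++ [cc] := by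
        rw [List.take_add_one, List.getElem?_drop, show m - κ + κ = m by omega,
          List.getElem?_eq_getElem hm, hcc, List.getD_eq_getElem s ' ' hm]
        rfl
      have h2 : (s.drop (m - κ)).take (κ + 1) = dd :: (s.drop (m + 1 - κ)).take κ := by
        rw [List.drop_eq_getElem_cons (show m - κ < s.length by omega), List.take_succ_cons,
          show m - κ + 1 = m + 1 - κ by omega, hdd,
          List.getD_eq_getElem s ' ' (show m - κ < s.length by omega)]
      rw [← h1, h2]
    set f1 := freq.insert cc (freq.getD cc 0 + 1) with hf1def
    set f2 := f1.insert dd (f1.getD dd 0 - 1) with hf2def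
    have hf2 : ∀ x : Char, f2.getD x 0 = ((pvWnd s κ (m + 1)).count x : Int) := by
      intro x
      rw [hf2def, PySem.Dict.getD_insert]
      by_cases hx : x = dd
      · rw [if_pos hx, hx, hf1 dd, hdec]
        rw [List.count_cons]
        simp
      · rw [if_neg hx, hf1 x, hdec, List.count_cons]
        have : (dd == x) = false := by simpa using Ne.symm hx
        simp [this]
    have hcond2 : (f2.getD dd 0 = 0) ↔ dd ∉ pvWnd s κ (m + 1) := by
      rw [hf2 dd]
      constructor
      · intro h
        exact List.count_eq_zero.mp (by omega)
      · intro h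
        rw [List.count_eq_zero.mpr h]
        rfl
    refine ⟨f2, ?_, hf2⟩
    have hw'len : (pvWnd s κ (m + 1)).length = κ := by
      rw [pv_wnd_drop s κ (m + 1) (by omega)]
      rw [List.length_take, List.length_drop]
      omega
    have hwnd : pvWnd s κ (m + 1) = pvWindow s κ (m + 1 - κ) := by
      rw [pv_wnd_drop s κ (m + 1) (by omega)]; rfl
    -- evaluate the step
    simp only [countDistAltStep, hc]
    rw [if_pos (show (m : Int) ≥ (κ : Int) by omega)]
    simp only [hd]
    rw [show freq.insert cc (freq.getD cc 0 + 1) = f1 from rfl,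
      show f1.insert dd (f1.getD dd 0 - 1) = f2 from rfl]
    -- distinct after insert
    have hdist1 : (if f1.getD cc 0 = 1 then ((pvWnd s κ m).toFinset.card : Int) + 1
        else ((pvWnd s κ m).toFinset.card : Int)) =
        (((dd :: pvWnd s κ (m + 1)).toFinset.card : Nat) : Int) := by
      rw [← hdec, pv_card_app]
      by_cases hcm : cc ∈ pvWnd s κ m
      · rw [if_neg (fun h => (hcond1.mp h) hcm), if_pos hcm]
      · rw [if_pos (hcond1.mpr hcm), if_neg hcm]
        push_cast
        ring
    rw [hdist1]
    -- distinct after remove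
    have hdist2 : (if f2.getD dd 0 = 0
        then (((dd :: pvWnd s κ (m + 1)).toFinset.card : Nat) : Int) - 1
        else (((dd :: pvWnd s κ (m + 1)).toFinset.card : Nat) : Int)) =
        ((pvWnd s κ (m + 1)).toFinset.card : Int) := by
      rw [pv_card_cons]
      by_cases hdm : dd ∈ pvWnd s κ (m + 1)
      · rw [if_neg (fun h => (hcond2.mp h) hdm), if_pos hdm]
      · rw [if_pos (hcond2.mpr hdm), if_neg hdm]
        push_cast
        ring
    rw [hdist2]
    -- result component
    have hres : (if ((m : Int) ≥ (κ : Int) - 1 ∧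
          ((pvWnd s κ (m + 1)).toFinset.card : Int) = (κ : Int))
        then res ++ [String.ofList (PySem.List.slice s (some ((m : Int) - (κ : Int) + 1))
            (some ((m : Int) + 1)))]
        else res) =
        res ++ (if κ ≤ m + 1 ∧ (pvWindow s κ (m + 1 - κ)).Nodup
          then [String.ofList (pvWindow s κ (m + 1 - κ))] else []) := by
      have hslice : PySem.List.slice s (some ((m : Int) - (κ : Int) + 1))
          (some ((m : Int) + 1)) = pvWindow s κ (m + 1 - κ) := by
        rw [show (m : Int) - (κ : Int) + 1 = ((m + 1 - κ : Nat) : Int) by omega,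
          show (m : Int) + 1 = ((m + 1 : Nat) : Int) by omega, PySem.List.slice_natCast]
        unfold pvWindow
        rw [show m + 1 - (m + 1 - κ) = κ by omega]
      have hcard : (((pvWnd s κ (m + 1)).toFinset.card : Int) = (κ : Int)) ↔
          (pvWindow s κ (m + 1 - κ)).Nodup := by
        rw [Int.natCast_inj, ← hwnd, pv_nodup_iff _ κ hw'len]
      by_cases hnd : (pvWindow s κ (m + 1 - κ)).Nodup
      · rw [if_pos ⟨by omega, hcard.mpr hnd⟩, if_pos ⟨by omega, hnd⟩, hslice]
      · rw [if_neg (fun h => hnd (hcard.mp h.2)), if_neg (fun h => hnd h.2)]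
        simp
    rw [hres]
  · -- no removal: window grows
    have hw : pvWnd s κ (m + 1) = pvWnd s κ m ++ [cc] := by
      rw [pv_wnd_take s κ m (by omega), pv_wnd_take s κ (m + 1) (by omega),
        List.take_add_one, List.getElem?_eq_getElem hm, hcc, List.getD_eq_getElem s ' ' hm]
      rfl
    set f1 := freq.insert cc (freq.getD cc 0 + 1) with hf1def
    refine ⟨f1, ?_, fun x => by rw [hw]; exact hf1 x⟩
    simp only [countDistAltStep, hc]
    rw [if_neg (show ¬ ((m : Int) ≥ (κ : Int)) by omega)]
    rw [show freq.insert cc (freq.getD cc 0 + 1) = f1 from rfl]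
    have hdist1 : (if f1.getD cc 0 = 1 then ((pvWnd s κ m).toFinset.card : Int) + 1
        else ((pvWnd s κ m).toFinset.card : Int)) =
        ((pvWnd s κ (m + 1)).toFinset.card : Int) := by
      rw [hw, pv_card_app]
      by_cases hcm : cc ∈ pvWnd s κ m
      · rw [if_neg (fun h => (hcond1.mp h) hcm), if_pos hcm]
      · rw [if_pos (hcond1.mpr hcm), if_neg hcm]
        push_cast
        ring
    rw [hdist1]
    have hres : (if ((m : Int) ≥ (κ : Int) - 1 ∧
          ((pvWnd s κ (m + 1)).toFinset.card : Int) = (κ : Int))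
        then res ++ [String.ofList (PySem.List.slice s (some ((m : Int) - (κ : Int) + 1))
            (some ((m : Int) + 1)))]
        else res) =
        res ++ (if κ ≤ m + 1 ∧ (pvWindow s κ (m + 1 - κ)).Nodup
          then [String.ofList (pvWindow s κ (m + 1 - κ))] else []) := by
      by_cases hκm1 : κ ≤ m + 1
      · have hκe : κ = m + 1 := by omega
        have hw'len : (pvWnd s κ (m + 1)).length = κ := by
          rw [pv_wnd_take s κ (m + 1) (by omega), List.length_take]
          omega
        have hwnd : pvWnd s κ (m + 1) = pvWindow s κ (m + 1 - κ) := by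
          rw [pv_wnd_take s κ (m + 1) (by omega)]
          unfold pvWindow
          rw [show m + 1 - κ = 0 by omega, List.drop_zero, hκe]
        have hslice : PySem.List.slice s (some ((m : Int) - (κ : Int) + 1))
            (some ((m : Int) + 1)) = pvWindow s κ (m + 1 - κ) := by
          rw [show (m : Int) - (κ : Int) + 1 = ((m + 1 - κ : Nat) : Int) by omega,
            show (m : Int) + 1 = ((m + 1 : Nat) : Int) by omega, PySem.List.slice_natCast]
          unfold pvWindow
          rw [show m + 1 - (m + 1 - κ) = κ by omega]
        have hcard : (((pvWnd s κ (m + 1)).toFinset.card : Int) = (κ : Int)) ↔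
            (pvWindow s κ (m + 1 - κ)).Nodup := by
          rw [Int.natCast_inj, ← hwnd, pv_nodup_iff _ κ hw'len]
        by_cases hnd : (pvWindow s κ (m + 1 - κ)).Nodup
        · rw [if_pos ⟨by omega, hcard.mpr hnd⟩, if_pos ⟨hκm1, hnd⟩, hslice]
        · rw [if_neg (fun h => hnd (hcard.mp h.2)), if_neg (fun h => hnd h.2)]
          simp
      · rw [if_neg (fun h => absurd h.1 (by omega)), if_neg (fun h => hκm1 h.1)]
        simp
    rw [hres]

-- B's loop, characterized
lemma pv_loopB (s : List Char) (κ : Nat) (hκ : 1 ≤ κ) (_hn : κ ≤ s.length) :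
    ∀ m, m ≤ s.length →
      ∃ freq : PySem.Dict Char Int,
        ((List.range m).foldl (fun st (j : Nat) => countDistAltStep s (κ : Int) st (j : Int))
            ([], PySem.Dict.empty, 0)) =
          (((List.range (m + 1 - κ)).filter (fun l => decide (pvWindow s κ l).Nodup)).map
              (fun l => String.ofList (pvWindow s κ l)),
            freq, ((pvWnd s κ m).toFinset.card : Int)) ∧
        ∀ c : Char, freq.getD c 0 = ((pvWnd s κ m).count c : Int) := by
  intro m
  induction m with
  | zero =>
    intro _
    refine ⟨PySem.Dict.empty, ?_, ?_⟩
    · rw [show 0 + 1 - κ = 0 by omega]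
      simp [pvWnd]
    · intro c; simp [pvWnd, PySem.Dict.getD, PySem.Dict.get?, PySem.Dict.empty]
  | succ m ih =>
    intro hm1
    obtain ⟨freq, hfold, hfreq⟩ := ih (by omega)
    obtain ⟨freq', hstep, hfreq'⟩ := pv_step_char s κ hκ m (by omega) _ freq hfreq
    refine ⟨freq', ?_, hfreq'⟩
    rw [List.range_succ, List.foldl_append, hfold, List.foldl_cons, List.foldl_nil, hstep]
    congr 1
    by_cases hκm : κ ≤ m + 1
    · rw [show m + 1 + 1 - κ = (m + 1 - κ) + 1 by omega, List.range_succ,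
        List.filter_append, List.map_append]
      congr 1
      by_cases hnd : (pvWindow s κ (m + 1 - κ)).Nodup
      · simp [hκm, hnd]
      · simp [hκm, hnd]
    · rw [show m + 1 + 1 - κ = 0 by omega, show m + 1 - κ = 0 by omega]
      simp [hκm]

lemma pv_countDist_alt_eq (s : List Char) (κ : Nat) (hκ : 1 ≤ κ) (hn : κ ≤ s.length) :
    ((PySem.List.pyRange 0 (s.length : Int) 1).foldl (countDistAltStep s (κ : Int))
      ([], PySem.Dict.empty, 0)).1 = pvAns s κ := by
  rw [PySem.List.pyRange_zero_natCast, List.foldl_map]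
  obtain ⟨freq, hfold, -⟩ := pv_loopB s κ hκ hn s.length le_rfl
  show ((List.range s.length).foldl (fun st (j : Nat) => countDistAltStep s (κ : Int) st (j : Int))
      ([], PySem.Dict.empty, 0)).1 = pvAns s κ
  rw [hfold]
  rfl

-- A's loop only extends its accumulator
lemma pv_loopA_prefix (s : List Char) (k : Int) :
    ∀ (fuel lo : Nat) (res : List String), res <+: countDistLoop s k fuel lo res := by
  intro fuel
  induction fuel with
  | zero => intro lo res; simp [countDistLoop]
  | succ f ih =>
    intro lo res
    simp only [countDistLoop]
    by_cases hg : (lo : Int) ≤ (s.length : Int) - k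
    · rw [if_pos hg]
      by_cases hc : ((countDistSetFold s k lo).length : Int) = k
      · rw [if_pos hc]
        exact List.IsPrefix.trans (List.prefix_append res _) (ih (lo + 1) _)
      · rw [if_neg hc]
        exact ih (lo + 1) res
    · rw [if_neg hg]

-- for k < 0 A appends nothing
lemma pv_loop_neg (s : List Char) (k : Int) (hk : k < 0) :
    ∀ (fuel lo : Nat) (res : List String), countDistLoop s k fuel lo res = res := by
  intro fuel
  induction fuel with
  | zero => intro lo res; simp [countDistLoop]
  | succ f ih =>
    intro lo res
    simp only [countDistLoop]
    by_cases hg : (lo : Int) ≤ (s.length : Int) - k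
    · rw [if_pos hg, if_neg (by have := Int.natCast_nonneg ((countDistSetFold s k lo).length); omega)]
      exact ih (lo + 1) res
    · rw [if_neg hg]

-- ===== VERDICT (by name: the statement is the Claim_ definition above) =====
theorem countDist_spec : Claim_unchanged_countDist := by
  intro str k _ hnD
  by_cases hk : k ≤ 0
  · have halt : countDist_alt str k = [] := by
      simp only [countDist_alt]
      rw [if_pos (Or.inl hk)]
    rw [halt]
    by_cases hs : str.toList = []
    · simp only [countDist]
      rw [if_pos (Or.inl hs)]
    · have hk0 : k < 0 := by
        have hne : k ≠ 0 := fun h0 => hnD ⟨h0, hs⟩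
        omega
      have hguard : ¬ (str.toList = [] ∨ ((str.toList.length : Int)) < k) := by
        rintro (h | h)
        · exact hs h
        · omega
      simp only [countDist]
      rw [if_neg hguard]
      exact pv_loop_neg str.toList k hk0 _ 0 []
  · by_cases hnk : ((str.toList.length : Int)) < k
    · simp only [countDist, countDist_alt]
      rw [if_pos (Or.inr hnk), if_pos (Or.inr hnk)]
    · obtain ⟨κ, rfl⟩ : ∃ κ : Nat, k = (κ : Int) :=
        ⟨k.toNat, (Int.toNat_of_nonneg (by omega)).symm⟩
      have hκ1 : 1 ≤ κ := by omega
      have hκn : κ ≤ str.toList.length := by omega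
      have hs : str.toList ≠ [] := by
        intro h
        rw [h] at hκn
        simp at hκn
        omega
      have hg1 : ¬ (str.toList = [] ∨ ((str.toList.length : Int)) < (κ : Int)) := by
        rintro (h | h)
        · exact hs h
        · omega
      have hg2 : ¬ ((κ : Int) ≤ 0 ∨ ((str.toList.length : Int)) < (κ : Int)) := by
        rintro (h | h) <;> omega
      simp only [countDist, countDist_alt]
      rw [if_neg hg1, if_neg hg2]
      rw [pv_countDist_eq str.toList κ hκ1 hκn, pv_countDist_alt_eq str.toList κ hκ1 hκn]

theorem countDist_changed : Claim_changed_countDist := by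
  unfold Claim_changed_countDist; decide

theorem countDist_tight : Claim_exact_countDist := by
  intro str k _ hD
  obtain ⟨hk0, hs⟩ := hD
  subst hk0
  have halt : countDist_alt str 0 = [] := by simp [countDist_alt]
  rw [halt]
  have hguard : ¬ (str.toList = [] ∨ ((str.toList.length : Int)) < 0) := by
    rintro (h | h)
    · exact hs h
    · omega
  simp only [countDist, if_neg hguard]
  have hfuel : (((str.toList.length : Int)) - 0 + 1).toNat = str.toList.length + 1 := by omega
  rw [hfuel]
  simp only [countDistLoop]
  rw [if_pos (by have := Int.natCast_nonneg str.toList.length; omega)]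
  have hset : countDistSetFold str.toList 0 0 = PySem.Set.empty := by
    unfold countDistSetFold
    rw [show PySem.List.pyRange 0 0 1 = [] from by decide]
    rfl
  rw [hset]
  rw [if_pos (by simp [PySem.Set.empty])]
  intro heq
  have hpre := pv_loopA_prefix str.toList 0 str.toList.length 1
    ([] ++ [String.ofList (PySem.List.slice str.toList (some ((0 : Nat) : Int)) (some (((0 : Nat) : Int) + 0)))])
  rw [heq] at hpre
  simp at hpre
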